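-- pv_equiv track=rewrite | github.com/GareemaRanjan/coding_practice | shaquille/distribute_tasks_in_node.py | findMaximumTasks
-- ===== SOURCE A (Python) =====
-- def findMaximumTasks(task, m):
--     # Create a dictionary to count the frequency of each task type
--     task_count = {}
--     for t in task:
--         if t in task_count:
--             task_count[t] += 1
--         else:
--             task_count[t] = 1
--
--     # Start calculating the maximum number of tasks that can be assigned fairly
--     total_tasks = 0
--     pending_tasks = {}
--     for t in list(task_count.keys()):
--         if task_count[t] >= m:
--             total_tasks += 1
--
--         else:
--             pending_tasks[t] = task_count[t]
--
--     sum_of_pending = 0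
--     for key, val in pending_tasks.items():
--         sum_of_pending += val
--
--     return (total_tasks + (sum_of_pending // m)) * m
-- ===== SOURCE B (Python) =====
-- def findMaximumTasks(task, m):
--     # Sort a copy and scan once, grouping equal consecutive elements into runs.
--     s = sorted(task)
--     total = 0
--     pending = 0
--     run = 0
--     prev = None
--     for x in s:
--         if run > 0 and x == prev:
--             run += 1
--         else:
--             if run > 0:
--                 if run >= m:
--                     total += 1
--                 else:
--                     pending += run
--             prev = x
--             run = 1
--     if run > 0:
--         if run >= m:
--             total += 1
--         else:
--             pending += run
--     return (total + pending // m) * m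
-- ===== Notes on version B (the rewrite author's own statement) =====
-- stated objective: alternative
-- what changed: B replaces A's frequency dictionary, key/pending-dict second pass and summing third pass by a single sort-then-scan that groups equal consecutive elements into runs and classifies each run length on the fly.
import Mathlib
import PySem

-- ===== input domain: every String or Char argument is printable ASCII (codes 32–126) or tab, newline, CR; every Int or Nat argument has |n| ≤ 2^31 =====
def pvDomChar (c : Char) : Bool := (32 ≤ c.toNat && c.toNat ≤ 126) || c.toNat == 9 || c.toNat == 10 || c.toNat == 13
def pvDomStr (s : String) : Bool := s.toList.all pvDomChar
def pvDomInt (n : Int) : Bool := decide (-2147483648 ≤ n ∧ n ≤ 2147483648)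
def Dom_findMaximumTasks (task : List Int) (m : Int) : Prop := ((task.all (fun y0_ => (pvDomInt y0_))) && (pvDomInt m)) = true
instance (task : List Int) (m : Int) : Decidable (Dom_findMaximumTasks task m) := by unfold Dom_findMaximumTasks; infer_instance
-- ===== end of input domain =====

-- B replaces A's two dictionaries and three passes by sort-then-scan over runs of equal
-- elements (objective: alternative — a different algorithm of similar cost).

-- ===== PORT A =====
def findMaximumTasks (task : List Int) (m : Int) : Int :=
  let task_count : PySem.Dict Int Int :=
    task.foldl (fun d t => if d.contains t then d.modify t 0 (· + 1) else d.insert t 1)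
      PySem.Dict.empty
  let st : Int × PySem.Dict Int Int :=
    task_count.keys.foldl
      (fun st t =>
        if m ≤ task_count.getD t 0 then (st.1 + 1, st.2)
        else (st.1, st.2.insert t (task_count.getD t 0)))
      (0, PySem.Dict.empty)
  let sum_of_pending : Int := st.2.items.foldl (fun s p => s + p.2) 0
  (st.1 + PySem.Int.floordiv sum_of_pending m) * m

-- ===== PORT B =====
-- state (total, pending, run, prev) of Source B's single scan
def flushB (m : Int) (st : Int × Int × Int × Option Int) : Int × Int :=
  if 0 < st.2.2.1 then
    (if m ≤ st.2.2.1 then (st.1 + 1, st.2.1) else (st.1, st.2.1 + st.2.2.1))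
  else (st.1, st.2.1)

def stepB (m : Int) (st : Int × Int × Int × Option Int) (x : Int) : Int × Int × Int × Option Int :=
  if 0 < st.2.2.1 ∧ some x = st.2.2.2 then (st.1, st.2.1, st.2.2.1 + 1, st.2.2.2)
  else ((flushB m st).1, (flushB m st).2, 1, some x)

def findMaximumTasks_alt (task : List Int) (m : Int) : Int :=
  let s := PySem.List.sorted task (fun x => x) false
  let tp := flushB m (s.foldl (stepB m) (0, 0, 0, none))
  (tp.1 + PySem.Int.floordiv tp.2 m) * m

-- ===== PRECONDITION & SPEC =====
-- Pre_ excludes only m = 0, where Python A raises ZeroDivisionError on 'sum_of_pending // m'.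
def Pre_findMaximumTasks (task : List Int) (m : Int) : Prop := m ≠ 0
instance (task : List Int) (m : Int) : Decidable (Pre_findMaximumTasks task m) := by
  unfold Pre_findMaximumTasks; infer_instance

def pvWitness_findMaximumTasks : List Int × Int := ([1, 1, 2], 2)

def Spec_findMaximumTasks (task : List Int) (m : Int) (out : Int) : Prop := out = findMaximumTasks_alt task m
instance (task : List Int) (m : Int) (out : Int) : Decidable (Spec_findMaximumTasks task m out) := by unfold Spec_findMaximumTasks; infer_instance

-- ===== CLAIM (what is proved, stated in full; the proofs are below) =====
def Claim_equal_findMaximumTasks : Prop := ∀ (task : List Int) (m : Int), Dom_findMaximumTasks task m → Pre_findMaximumTasks task m → Spec_findMaximumTasks task m (findMaximumTasks task m)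

-- ===== LEMMAS AND PROOFS =====

-- canonical value of both programs: per distinct task type v with count c,
-- add 1 to the first component if m ≤ c, else add c to the second
def Tof (m : Int) (cnt : Int → Int) (ks : List Int) : Int :=
  ((ks.filter (fun v => decide (m ≤ cnt v))).length : Int)

def Pof (m : Int) (cnt : Int → Int) (ks : List Int) : Int :=
  ((ks.filter (fun v => decide (¬ m ≤ cnt v))).map cnt).sum

def sumVals (d : PySem.Dict Int Int) : Int := d.items.foldl (fun s p => s + p.2) 0

lemma Tof_perm (m : Int) (cnt : Int → Int) {ks ks' : List Int} (h : ks.Perm ks') :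
    Tof m cnt ks = Tof m cnt ks' := by
  unfold Tof
  rw [(h.filter _).length_eq]

lemma Pof_perm (m : Int) (cnt : Int → Int) {ks ks' : List Int} (h : ks.Perm ks') :
    Pof m cnt ks = Pof m cnt ks' := by
  unfold Pof
  exact ((h.filter _).map cnt).sum_eq

lemma Tof_congr (m : Int) {cnt cnt' : Int → Int} (ks : List Int)
    (h : ∀ v ∈ ks, cnt v = cnt' v) : Tof m cnt ks = Tof m cnt' ks := by
  unfold Tof
  rw [List.filter_congr (fun v hv => by rw [h v hv])]

lemma Pof_congr (m : Int) {cnt cnt' : Int → Int} (ks : List Int)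
    (h : ∀ v ∈ ks, cnt v = cnt' v) : Pof m cnt ks = Pof m cnt' ks := by
  unfold Pof
  rw [List.filter_congr (fun v hv => by rw [h v hv])]
  refine congrArg _ (List.map_congr_left ?_)
  intro v hv
  exact h v (List.mem_of_mem_filter hv)

-- A's counting loop is PySem.Dict.counter
lemma fold_counter (task : List Int) :
    task.foldl (fun d t => if d.contains t then d.modify t 0 (· + 1) else d.insert t 1)
      PySem.Dict.empty = PySem.Dict.counter task := by
  have hstep : (fun (d : PySem.Dict Int Int) t =>
      if d.contains t then d.modify t 0 (· + 1) else d.insert t 1) =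
      fun d t => d.insert t (d.getD t 0 + 1) := by
    funext d t
    by_cases h : d.contains t = true
    · simp [h, PySem.Dict.modify]
    · have h' : d.contains t = false := by simpa using h
      simp [h', PySem.Dict.getD_of_not_contains d _ h']
  rw [hstep, PySem.Dict.foldl_insert_getD_add_one_eq_counter]

lemma sumVals_insert_fresh (d : PySem.Dict Int Int) (k v : Int) (h : d.contains k = false) :
    sumVals (d.insert k v) = sumVals d + v := by
  unfold sumVals
  rw [PySem.Dict.items_insert_of_not_contains d v h, List.foldl_append]
  simp

-- A's second loop computes (Tof, Pof) over the key list
lemma loopA (m : Int) (cnt : Int → Int) :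
    ∀ (ks : List Int) (t : Int) (d : PySem.Dict Int Int), ks.Nodup →
      (∀ k ∈ ks, d.contains k = false) →
      (ks.foldl (fun st k => if m ≤ cnt k then (st.1 + 1, st.2)
          else (st.1, st.2.insert k (cnt k))) (t, d)).1 = t + Tof m cnt ks ∧
      sumVals (ks.foldl (fun st k => if m ≤ cnt k then (st.1 + 1, st.2)
          else (st.1, st.2.insert k (cnt k))) (t, d)).2 = sumVals d + Pof m cnt ks := by
  intro ks
  induction ks with
  | nil => intro t d _ _; simp [Tof, Pof]
  | cons k ks ih =>
    intro t d hnd hfresh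
    have hk : d.contains k = false := hfresh k (List.mem_cons_self ..)
    have hnd' := hnd.of_cons
    have hknotin : k ∉ ks := (List.nodup_cons.mp hnd).1
    by_cases hm : m ≤ cnt k
    · have := ih (t + 1) d hnd' (fun k' hk' => hfresh k' (List.mem_cons_of_mem _ hk'))
      simp only [List.foldl_cons, if_pos hm]
      refine ⟨this.1.trans ?_, this.2.trans ?_⟩
      · simp [Tof, hm]; ring
      · simp [Pof, hm]

    · have hfresh' : ∀ k' ∈ ks, (d.insert k (cnt k)).contains k' = false := by
        intro k' hk'
        rw [PySem.Dict.contains_insert]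
        have : k' ≠ k := fun e => hknotin (e ▸ hk')
        simp [this, hfresh k' (List.mem_cons_of_mem _ hk')]
      have := ih t (d.insert k (cnt k)) hnd' hfresh'
      simp only [List.foldl_cons, if_neg hm]
      refine ⟨this.1.trans ?_, this.2.trans ?_⟩
      · simp [Tof, hm]
      · rw [sumVals_insert_fresh d k (cnt k) hk]
        simp [Pof, not_le.mp hm]; ring

lemma dedup_cons_perm (x : Int) (tl : List Int) :
    (PySem.List.dedup (x :: tl)).Perm (x :: PySem.List.dedup (tl.filter (· ≠ x))) := by
  rw [List.perm_ext_iff_of_nodup]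
  · intro v
    by_cases hv : v = x <;>
      simp [List.mem_filter, hv]
  · rw [PySem.List.dedup_eq_ofList]; exact PySem.Set.nodup_ofList _
  · refine List.nodup_cons.mpr ⟨?_, ?_⟩
    · intro hx
      have := (PySem.List.mem_dedup _ _).mp hx
      simp [List.mem_filter] at this
    · rw [PySem.List.dedup_eq_ofList]; exact PySem.Set.nodup_ofList _

-- peeling the first distinct value off the canonical sums
lemma Tof_cons_generic (m : Int) (cnt : Int → Int) (x : Int) (ks : List Int) :
    Tof m cnt (x :: ks) = (if m ≤ cnt x then 1 else 0) + Tof m cnt ks := by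
  unfold Tof
  rw [List.filter_cons]
  by_cases h : m ≤ cnt x
  · simp [h]; ring
  · simp [h]

lemma Pof_cons_generic (m : Int) (cnt : Int → Int) (x : Int) (ks : List Int) :
    Pof m cnt (x :: ks) = (if m ≤ cnt x then 0 else cnt x) + Pof m cnt ks := by
  unfold Pof
  rw [List.filter_cons]
  by_cases h : m ≤ cnt x
  · simp [h]
  · simp [h]

lemma cnt_shift_congr (x : Int) (tl : List Int) :
    ∀ v ∈ PySem.List.dedup (tl.filter (· ≠ x)),
      (fun v => (((x :: tl).count v : Nat) : Int)) v = (fun v => ((tl.count v : Nat) : Int)) v := by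
  intro v hv
  have hvx : v ≠ x := by
    have := (PySem.List.mem_dedup _ _).mp hv
    simp [List.mem_filter] at this
    exact this.2
  simp [Ne.symm hvx]

lemma count_self_shift (x : Int) (tl : List Int) :
    (((x :: tl).count x : Nat) : Int) = 1 + (tl.count x : Int) := by
  simp; omega

lemma Tof_cons (m x : Int) (tl : List Int) :
    Tof m (fun v => (((x :: tl).count v : Nat) : Int)) (PySem.List.dedup (x :: tl)) =
      (if m ≤ 1 + (tl.count x : Int) then 1 else 0) +
        Tof m (fun v => ((tl.count v : Nat) : Int)) (PySem.List.dedup (tl.filter (· ≠ x))) := by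
  rw [Tof_perm m _ (dedup_cons_perm x tl), Tof_cons_generic,
    Tof_congr m _ (cnt_shift_congr x tl)]
  simp only [count_self_shift]

lemma Pof_cons (m x : Int) (tl : List Int) :
    Pof m (fun v => (((x :: tl).count v : Nat) : Int)) (PySem.List.dedup (x :: tl)) =
      (if m ≤ 1 + (tl.count x : Int) then 0 else 1 + (tl.count x : Int)) +
        Pof m (fun v => ((tl.count v : Nat) : Int)) (PySem.List.dedup (tl.filter (· ≠ x))) := by
  rw [Pof_perm m _ (dedup_cons_perm x tl), Pof_cons_generic,
    Pof_congr m _ (cnt_shift_congr x tl)]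
  simp only [count_self_shift]

-- B's scan, mid-run
lemma loopB (m : Int) :
    ∀ (l : List Int) (t p r a : Int), 0 < r → (∀ x ∈ l, a ≤ x) → l.Pairwise (· ≤ ·) →
      flushB m (l.foldl (stepB m) (t, p, r, some a)) =
        (t + (if m ≤ r + (l.count a : Int) then 1 else 0) +
            Tof m (fun v => ((l.count v : Nat) : Int)) (PySem.List.dedup (l.filter (· ≠ a))),
         p + (if m ≤ r + (l.count a : Int) then 0 else r + (l.count a : Int)) +
            Pof m (fun v => ((l.count v : Nat) : Int)) (PySem.List.dedup (l.filter (· ≠ a)))) := by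
  intro l
  induction l with
  | nil =>
    intro t p r a hr _ _
    simp only [List.foldl_nil, flushB, List.count_nil, List.filter_nil]
    simp [hr, Tof, Pof]
    split_ifs <;> simp
  | cons x tl ih =>
    intro t p r a hr hle hpw
    by_cases hx : x = a
    · subst hx
      have hstep : stepB m (t, p, r, some x) x = (t, p, r + 1, some x) := by
        simp [stepB, hr]
      rw [List.foldl_cons, hstep,
        ih t p (r + 1) x (by omega) (fun y hy => (List.pairwise_cons.mp hpw).1 y hy)
          (List.pairwise_cons.mp hpw).2]
      have hc : ((x :: tl).count x : Int) = (tl.count x : Int) + 1 := by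
        simp
      have hf : (x :: tl).filter (· ≠ x) = tl.filter (· ≠ x) := by
        simp
      rw [← Tof_congr m _ (cnt_shift_congr x tl), ← Pof_congr m _ (cnt_shift_congr x tl), hf]
      have harith : r + 1 + (tl.count x : Int) = r + ((x :: tl).count x : Int) := by
        rw [hc]; ring
      rw [harith]
    · -- x ≠ a: the run of a ends; since a ≤ x and a ≠ x, a < x ≤ every later element
      have hax : a < x := lt_of_le_of_ne (hle x (List.mem_cons_self ..)) (fun e => hx e.symm)
      have hnotin : a ∉ (x :: tl) := by
        intro hmem
        rcases List.mem_cons.mp hmem with h | h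
        · exact hx h.symm
        · have := (List.pairwise_cons.mp hpw).1 a h
          omega
      have hstep : stepB m (t, p, r, some a) x =
          ((flushB m (t, p, r, some a)).1, (flushB m (t, p, r, some a)).2, 1, some x) := by
        have : ¬ (0 < r ∧ some x = some a) := by
          rintro ⟨_, h⟩
          exact hx (Option.some.inj h)
        unfold stepB
        rw [if_neg this]
      have hflush : flushB m (t, p, r, some a) =
          (if m ≤ r then (t + 1, p) else (t, p + r)) := by
        simp [flushB, hr]
      rw [List.foldl_cons, hstep,
        ih (flushB m (t, p, r, some a)).1 (flushB m (t, p, r, some a)).2 1 x (by omega)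
          (fun y hy => (List.pairwise_cons.mp hpw).1 y hy) (List.pairwise_cons.mp hpw).2]
      have hca : (x :: tl).count a = 0 := List.count_eq_zero.mpr hnotin
      have hfa : (x :: tl).filter (· ≠ a) = x :: tl := by
        rw [List.filter_eq_self]
        intro y hy
        have : y ≠ a := by
          intro e; exact hnotin (e ▸ hy)
        simp [this]
      rw [hca, hfa, Tof_cons m x tl, Pof_cons m x tl, hflush]
      simp only [apply_ite (Prod.fst), apply_ite (Prod.snd), Nat.cast_zero, add_zero, Prod.mk.injEq]
      split_ifs <;> constructor <;> ring

lemma alt_canon (task : List Int) (m : Int) :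
    findMaximumTasks_alt task m =
      (Tof m (fun v => ((task.count v : Nat) : Int)) (PySem.Set.ofList task) +
        PySem.Int.floordiv (Pof m (fun v => ((task.count v : Nat) : Int)) (PySem.Set.ofList task)) m) * m := by
  simp only [findMaximumTasks_alt]
  have hperm : (PySem.List.sorted task (fun x => x) false).Perm task :=
    PySem.List.sorted_perm task (fun x => x) false
  have hcnt : ∀ v : Int, (PySem.List.sorted task (fun x => x) false).count v = task.count v :=
    fun v => hperm.count_eq v
  have hpw : (PySem.List.sorted task (fun x => x) false).Pairwise (· ≤ ·) := by
    have := PySem.List.sorted_pairwise task (fun x => x)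
    exact this
  have hkperm : ∀ (l : List Int), l.Perm task →
      (PySem.List.dedup l).Perm (PySem.Set.ofList task) := by
    intro l hl
    rw [List.perm_ext_iff_of_nodup]
    · intro v
      rw [PySem.List.mem_dedup, PySem.Set.mem_ofList]
      exact hl.mem_iff
    · rw [PySem.List.dedup_eq_ofList]; exact PySem.Set.nodup_ofList _
    · exact PySem.Set.nodup_ofList _
  cases hs : PySem.List.sorted task (fun x => x) false with
  | nil =>
    have htask : task = [] := by
      have := hs ▸ hperm
      exact this.symm.eq_nil
    subst htask
    have hnil : PySem.Set.ofList ([] : List Int) = [] := rfl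
    simp [flushB, Tof, Pof, hnil]
  | cons x tl =>
    have hpw' : (x :: tl).Pairwise (· ≤ ·) := hs ▸ hpw
    have hstep0 : stepB m (0, 0, 0, none) x = (0, 0, 1, some x) := by
      simp [stepB, flushB]
    rw [List.foldl_cons, hstep0,
      loopB m tl 0 0 1 x (by omega) (fun y hy => (List.pairwise_cons.mp hpw').1 y hy)
        (List.pairwise_cons.mp hpw').2]
    have hT := Tof_cons m x tl
    have hP := Pof_cons m x tl
    have hTp : Tof m (fun v => (((x :: tl).count v : Nat) : Int)) (PySem.List.dedup (x :: tl))
        = Tof m (fun v => ((task.count v : Nat) : Int)) (PySem.Set.ofList task) := by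
      rw [Tof_congr m _ (fun v _ => by rw [← hs, hcnt v]),
        Tof_perm m _ (hkperm _ (hs ▸ hperm))]
    have hPp : Pof m (fun v => (((x :: tl).count v : Nat) : Int)) (PySem.List.dedup (x :: tl))
        = Pof m (fun v => ((task.count v : Nat) : Int)) (PySem.Set.ofList task) := by
      rw [Pof_congr m _ (fun v _ => by rw [← hs, hcnt v]),
        Pof_perm m _ (hkperm _ (hs ▸ hperm))]
    rw [← hTp, ← hPp, hT, hP]
    simp only []
    split_ifs <;> push_cast <;> ring_nf

lemma a_canon (task : List Int) (m : Int) :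
    findMaximumTasks task m =
      (Tof m (fun v => ((task.count v : Nat) : Int)) (PySem.Set.ofList task) +
        PySem.Int.floordiv (Pof m (fun v => ((task.count v : Nat) : Int)) (PySem.Set.ofList task)) m) * m := by
  have h := loopA m (fun v => ((task.count v : Nat) : Int)) (PySem.Set.ofList task) 0
    PySem.Dict.empty (PySem.Set.nodup_ofList task) (fun k _ => PySem.Dict.contains_empty k)
  have h2 := h.2
  unfold sumVals at h2
  simp only [findMaximumTasks]
  rw [fold_counter]
  simp only [PySem.Dict.keys_counter, PySem.Dict.getD_counter]
  rw [h.1, h2]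
  have hempty : PySem.Dict.empty.items.foldl (fun (s : Int) (p : Int × Int) => s + p.2) 0 = 0 := rfl
  rw [hempty]
  simp

-- ===== VERDICT (by name: the statement is the Claim_ definition above) =====
theorem findMaximumTasks_spec : Claim_equal_findMaximumTasks := by
  intro task m _ _
  unfold Spec_findMaximumTasks
  rw [a_canon, alt_canon]
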